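-- pv_equiv track=rewrite | github.com/AutomatosAI/automatos-ai | orchestrator/context_engineering/retrieval/multimodal_processor.py | _is_tabular_data
-- ===== SOURCE A (Python) =====
-- def _is_tabular_data(content: str) -> bool:
--     """Check if content is tabular data"""
--
--     lines = content.split('\n')
--     if len(lines) < 2:
--         return False
--
--     # Check for consistent delimiters
--     delimiters = [',', '\t', ';', '|']
--
--     for delimiter in delimiters:
--         delimiter_counts = [line.count(delimiter) for line in lines if line.strip()]
--         if len(set(delimiter_counts)) == 1 and delimiter_counts[0] > 0:
--             return True
--
--     return False
-- ===== SOURCE B (Python) =====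
-- def _is_tabular_data(content: str) -> bool:
--     """Check if content is tabular data (single char-level streaming pass)"""
--     if '\n' not in content:
--         return False
--     # per delimiter: [delimiter, reference count or -1, still consistent?, count in current line]
--     state = [[d, -1, True, 0] for d in ',\t;|']
--     blank = True
--     for ch in content + '\n':
--         if ch == '\n':
--             if not blank:
--                 for s in state:
--                     if s[1] == -1:
--                         s[1] = s[3]
--                     elif s[1] != s[3]:
--                         s[2] = False
--             for s in state:
--                 s[3] = 0
--             blank = True
--         else:
--             for s in state:
--                 if ch == s[0]:
--                     s[3] += 1
--             blank = blank and ch.isspace()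
--     return any(s[1] > 0 and s[2] for s in state)
-- ===== Notes on version B (the rewrite author's own statement) =====
-- stated objective: alternative
-- what changed: B replaces A's split-into-lines plus four list-scans-with-set-comparison by a single character-level streaming pass that maintains, per delimiter, a running (reference count, still-consistent flag, current-line count) state and a blankness flag, deciding tabularity online with no intermediate line or count lists.
import Mathlib
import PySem

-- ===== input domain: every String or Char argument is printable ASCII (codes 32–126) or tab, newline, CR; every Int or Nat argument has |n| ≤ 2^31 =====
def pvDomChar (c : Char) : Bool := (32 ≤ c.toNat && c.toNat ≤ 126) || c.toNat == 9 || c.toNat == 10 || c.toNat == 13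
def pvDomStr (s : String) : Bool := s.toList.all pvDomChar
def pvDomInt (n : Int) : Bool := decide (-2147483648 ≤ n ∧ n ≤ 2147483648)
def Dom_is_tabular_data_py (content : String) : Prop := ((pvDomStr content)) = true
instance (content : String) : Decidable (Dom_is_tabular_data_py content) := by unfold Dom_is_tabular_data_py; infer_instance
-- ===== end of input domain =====

-- B replaces A's split-into-lines plus per-delimiter count/set passes by a single character-level
-- streaming pass with per-delimiter consistency state (objective: alternative algorithm).

-- ===== PORT A =====
def is_tabular_data_py (content : String) : Bool :=
  let lines := PySem.Chars.splitOn content.toList ['\n']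
  if lines.length < 2 then false
  else
    [',', '\t', ';', '|'].any (fun d =>
      let delimiter_counts := (lines.filter (fun l => decide (PySem.Chars.strip l ≠ []))).map
        (fun l => PySem.Chars.count l [d])
      decide ((PySem.Set.ofList delimiter_counts).length = 1) && decide (delimiter_counts.headD 0 > 0))

-- ===== PORT B =====
-- state entry per delimiter: (delimiter, reference count or -1, still consistent?, count in current line)
def pvBump (ch : Char) (t : Char × Int × Bool × Int) : Char × Int × Bool × Int :=
  if ch = t.1 then (t.1, t.2.1, t.2.2.1, t.2.2.2 + 1) else t

def pvFlushOne (t : Char × Int × Bool × Int) : Char × Int × Bool × Int :=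
  if t.2.1 = -1 then (t.1, t.2.2.2, t.2.2.1, t.2.2.2)
  else if t.2.1 ≠ t.2.2.2 then (t.1, t.2.1, false, t.2.2.2)
  else t

def pvReset (t : Char × Int × Bool × Int) : Char × Int × Bool × Int :=
  (t.1, t.2.1, t.2.2.1, 0)

def pvStep (s : List (Char × Int × Bool × Int) × Bool) (ch : Char) :
    List (Char × Int × Bool × Int) × Bool :=
  if ch = '\n' then
    ((if s.2 then s.1 else s.1.map pvFlushOne).map pvReset, true)
  else
    (s.1.map (pvBump ch), s.2 && PySem.Chars.isspace ch)

def is_tabular_data_py_alt (content : String) : Bool :=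
  if PySem.Chars.isIn ['\n'] content.toList then
    let r := (content.toList ++ ['\n']).foldl pvStep
      ([',', '\t', ';', '|'].map (fun d => (d, (-1 : Int), true, (0 : Int))), true)
    r.1.any (fun t => decide (0 < t.2.1) && t.2.2.1)
  else false

-- ===== PRECONDITION & SPEC =====
def Spec_is_tabular_data_py (content : String) (out : Bool) : Prop := out = is_tabular_data_py_alt content
instance (content : String) (out : Bool) : Decidable (Spec_is_tabular_data_py content out) := by unfold Spec_is_tabular_data_py; infer_instance

-- ===== CLAIM (what is proved, stated in full; the proofs are below) =====
def Claim_equal_is_tabular_data_py : Prop := ∀ (content : String), Dom_is_tabular_data_py content → Spec_is_tabular_data_py content (is_tabular_data_py content)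

-- ===== LEMMAS AND PROOFS =====

def pvSplitRun (cur : List Char) : List Char → List (List Char)
  | [] => [cur.reverse]
  | c :: t => if c = '\n' then cur.reverse :: pvSplitRun [] t else pvSplitRun (c :: cur) t

lemma pv_go_eq (l : List Char) : ∀ (cur : List Char) (acc : List (List Char)) (fuel : Nat), l.length < fuel →
    PySem.Chars.splitOn.go ['\n'] fuel l cur acc = acc.reverse ++ pvSplitRun cur l := by
  induction l with
  | nil =>
    intro cur acc fuel h
    cases fuel with
    | zero => omega
    | succ f => simp [PySem.Chars.splitOn.go, pvSplitRun]
  | cons c t ih =>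
    intro cur acc fuel h
    cases fuel with
    | zero => simp at h
    | succ f =>
      rw [PySem.Chars.splitOn.go]
      by_cases hc : c = '\n'
      · subst hc
        simp only [List.isPrefixOf, beq_self_eq_true, Bool.true_and,
          List.length_singleton, List.drop_succ_cons, List.drop_zero, if_true]
        rw [ih [] (cur.reverse :: acc) f (by simpa using h)]
        simp [pvSplitRun]
      · have : (['\n'].isPrefixOf (c :: t)) = false := by
          simp [List.isPrefixOf]; exact fun hh => absurd hh.symm hc
        rw [this]
        simp only [Bool.false_eq_true, if_false]
        rw [ih (c :: cur) acc f (by simpa using h)]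
        simp [pvSplitRun, hc]

lemma pv_splitOn_eq (cs : List Char) :
    PySem.Chars.splitOn cs ['\n'] = pvSplitRun [] cs := by
  rw [PySem.Chars.splitOn, pv_go_eq cs [] [] (cs.length + 1) (by omega)]
  simp

lemma pv_splitRun_length (l : List Char) : ∀ cur, (pvSplitRun cur l).length = l.count '\n' + 1 := by
  induction l with
  | nil => intro cur; simp [pvSplitRun]
  | cons c t ih =>
    intro cur
    by_cases hc : c = '\n'
    · subst hc; simp [pvSplitRun, ih]
    · simp [pvSplitRun, hc, ih]

lemma pv_splitRun_flatten (l : List Char) : ∀ cur,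
    ((pvSplitRun cur l).map (fun p => p ++ ['\n'])).flatten = cur.reverse ++ l ++ ['\n'] := by
  induction l with
  | nil => intro cur; simp [pvSplitRun]
  | cons c t ih =>
    intro cur
    by_cases hc : c = '\n'
    · subst hc; simp [pvSplitRun, ih]
    · simp [pvSplitRun, hc, ih]

lemma pv_splitRun_no_nl (l : List Char) : ∀ cur, '\n' ∉ cur →
    ∀ p ∈ pvSplitRun cur l, '\n' ∉ p := by
  induction l with
  | nil => intro cur hc p hp; simp [pvSplitRun] at hp; subst hp; simpa using hc
  | cons c t ih =>
    intro cur hc p hp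
    by_cases hcn : c = '\n'
    · subst hcn
      simp only [pvSplitRun] at hp
      rcases List.mem_cons.mp hp with rfl | hp
      · simpa using hc
      · exact ih [] (by simp) p hp
    · simp only [pvSplitRun, if_neg hcn] at hp
      exact ih (c :: cur) (by simp [hc, Ne.symm hcn]) p hp

lemma pv_count_go (d : Char) (l : List Char) : ∀ (acc fuel : Nat), l.length ≤ fuel →
    PySem.Chars.count.go [d] fuel l acc = acc + l.count d := by
  induction l with
  | nil =>
    intro acc fuel h
    cases fuel with
    | zero => simp [PySem.Chars.count.go]
    | succ f => simp [PySem.Chars.count.go]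
  | cons c t ih =>
    intro acc fuel h
    cases fuel with
    | zero => simp at h
    | succ f =>
      rw [PySem.Chars.count.go]
      by_cases hc : d = c
      · subst hc
        simp only [List.isPrefixOf, beq_self_eq_true, Bool.true_and,
          List.length_singleton, List.drop_succ_cons, List.drop_zero, if_true]
        rw [ih (acc + 1) f (by simpa using h)]
        simp
        omega
      · have : (([d].isPrefixOf (c :: t))) = false := by
          simp [List.isPrefixOf]; exact fun hh => absurd hh hc
        rw [this]
        simp only [Bool.false_eq_true, if_false]
        rw [ih acc f (by simpa using h)]
        simp [List.count_cons]
        exact fun hh => hc (Eq.symm hh)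

lemma pv_count_single (d : Char) (l : List Char) : PySem.Chars.count l [d] = l.count d := by
  rw [PySem.Chars.count]
  simp [pv_count_go d l 0 l.length le_rfl]

lemma pv_strip_nil_iff (l : List Char) :
    PySem.Chars.strip l = [] ↔ l.all PySem.Chars.isspace = true := by
  rw [PySem.Chars.strip, PySem.Chars.rstrip, PySem.Chars.lstrip]
  rw [List.reverse_eq_nil_iff, List.dropWhile_eq_nil_iff, List.all_eq_true]
  constructor
  · intro h x hx
    rw [← List.takeWhile_append_dropWhile (p := PySem.Chars.isspace) (l := l)] at hx
    rcases List.mem_append.mp hx with h1 | h2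
    · exact List.mem_takeWhile_imp h1
    · exact h x (by simpa using h2)
  · intro h x hx
    exact h x (List.dropWhile_sublist (p := PySem.Chars.isspace) (l := l) |>.mem (by simpa using hx))

def pvAddc (l : List Char) (t : Char × Int × Bool × Int) : Char × Int × Bool × Int :=
  (t.1, t.2.1, t.2.2.1, t.2.2.2 + (l.count t.1 : Int))

lemma pv_foldl_no_nl (l : List Char) (h : '\n' ∉ l) :
    ∀ (st : List (Char × Int × Bool × Int)) (blank : Bool),
    l.foldl pvStep (st, blank) = (st.map (pvAddc l), blank && l.all PySem.Chars.isspace) := by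
  induction l with
  | nil =>
    intro st blank
    have hid : pvAddc [] = id := by
      funext t'; simp [pvAddc]
    simp [hid]
  | cons c t ih =>
    intro st blank
    have hc : c ≠ '\n' := fun hh => h (by simp [hh])
    have ht : '\n' ∉ t := fun hh => h (List.mem_cons_of_mem c hh)
    simp only [List.foldl_cons, pvStep, if_neg hc]
    rw [ih ht]
    rw [Prod.mk.injEq]
    constructor
    · rw [List.map_map]
      apply List.map_congr_left
      intro t' _
      simp only [Function.comp_apply, pvBump, pvAddc]
      by_cases hb : c = t'.1
      · simp only [List.count_cons, hb, beq_self_eq_true, if_pos]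
        push_cast
        ring_nf
      · simp only [if_neg hb, List.count_cons]
        have : (t'.1 == c) = false := by simp; exact fun hh => hb (Eq.symm hh)
        simp [hb]
    · simp [Bool.and_assoc]

def pvLineT (l : List Char) (st : List (Char × Int × Bool × Int)) : List (Char × Int × Bool × Int) :=
  ((if l.all PySem.Chars.isspace then st.map (pvAddc l) else (st.map (pvAddc l)).map pvFlushOne).map pvReset)

lemma pv_foldl_line (l : List Char) (h : '\n' ∉ l) (st : List (Char × Int × Bool × Int)) :
    (l ++ ['\n']).foldl pvStep (st, true) = (pvLineT l st, true) := by
  rw [List.foldl_append, pv_foldl_no_nl l h st true]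
  simp only [List.foldl_cons, List.foldl_nil, pvStep, pvLineT, Bool.true_and, if_true]

lemma pv_foldl_lines (L : List (List Char)) : ∀ (st : List (Char × Int × Bool × Int)),
    (∀ l ∈ L, '\n' ∉ l) →
    ((L.map (fun p => p ++ ['\n'])).flatten).foldl pvStep (st, true) =
      (L.foldl (fun s l => pvLineT l s) st, true) := by
  induction L with
  | nil => intro st _; simp
  | cons l t ih =>
    intro st h
    rw [List.map_cons, List.flatten_cons, List.foldl_append,
      pv_foldl_line l (h l (by simp)) st]
    exact ih (pvLineT l st) (fun l' hl' => h l' (by simp [hl']))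

def pvEnt (d : Char) (p : Int × Bool) : Char × Int × Bool × Int := (d, p.1, p.2, 0)

def pvUpd (l : List Char) (p : Int × Bool) (d : Char) : Int × Bool :=
  if l.all PySem.Chars.isspace then p
  else if p.1 = -1 then ((l.count d : Int), p.2)
  else if p.1 ≠ (l.count d : Int) then (p.1, false)
  else p

lemma pv_lineT_map (l : List Char) (ds : List Char) (g : Char → Int × Bool) :
    pvLineT l (ds.map (fun d => pvEnt d (g d))) = ds.map (fun d => pvEnt d (pvUpd l (g d) d)) := by
  unfold pvLineT
  by_cases hb : l.all PySem.Chars.isspace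
  · simp only [if_pos hb, List.map_map]
    apply List.map_congr_left
    intro d _
    simp [Function.comp_apply, pvAddc, pvEnt, pvReset, pvUpd, hb]
  · simp only [if_neg hb, List.map_map]
    apply List.map_congr_left
    intro d _
    simp only [Function.comp_apply, pvAddc, pvEnt, pvReset, pvUpd, hb]
    by_cases h1 : (g d).1 = -1
    · simp [pvFlushOne, h1]
    · by_cases h2 : (g d).1 = (l.count d : Int)
      · simp [pvFlushOne, h2]
      · simp [pvFlushOne, h1, h2]

lemma pv_foldl_lineT (L : List (List Char)) : ∀ (ds : List Char) (g : Char → Int × Bool),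
    L.foldl (fun s l => pvLineT l s) (ds.map (fun d => pvEnt d (g d))) =
      ds.map (fun d => pvEnt d (L.foldl (fun p l => pvUpd l p d) (g d))) := by
  induction L with
  | nil => intro ds g; simp
  | cons l t ih =>
    intro ds g
    simp only [List.foldl_cons]
    rw [pv_lineT_map l ds g, ih ds (fun d => pvUpd l (g d) d)]

def pvQ (p : Int × Bool) (c : Int) : Int × Bool :=
  if p.1 = -1 then (c, p.2) else if p.1 ≠ c then (p.1, false) else p

lemma pv_fold_filter (L : List (List Char)) (d : Char) : ∀ (p : Int × Bool),
    L.foldl (fun p l => pvUpd l p d) p =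
      ((L.filter (fun l => !(l.all PySem.Chars.isspace))).map (fun l => (l.count d : Int))).foldl pvQ p := by
  induction L with
  | nil => intro p; simp
  | cons l t ih =>
    intro p
    by_cases hb : l.all PySem.Chars.isspace
    · simp only [List.foldl_cons, List.filter_cons, hb]
      rw [ih]
      simp [pvUpd, hb]
    · simp only [List.foldl_cons, List.filter_cons, hb]
      rw [ih]
      simp only [Bool.not_false, if_pos, List.map_cons, List.foldl_cons]
      congr 1
      simp [pvUpd, pvQ, hb]

lemma pv_qfold_known (ks : List Int) : ∀ (c : Int) (b : Bool), 0 ≤ c →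
    ks.foldl pvQ (c, b) = (c, b && ks.all (fun x => x == c)) := by
  induction ks with
  | nil => intro c b _; simp
  | cons k t ih =>
    intro c b hc
    have hne : ¬ c = -1 := by omega
    by_cases hk : c = k
    · subst hk
      have hq : pvQ (c, b) c = (c, b) := by simp [pvQ, hne]
      rw [List.foldl_cons, hq, ih c b hc]
      simp
    · have hq : pvQ (c, b) k = (c, false) := by simp [pvQ, hne, hk]
      rw [List.foldl_cons, hq, ih c false hc]
      have hkc : (k == c) = false := by simp; exact fun hh => hk (Eq.symm hh)
      simp [hkc]

lemma pv_foldl_add_mono (t : List Nat) : ∀ (s : PySem.Set Nat), s.length ≤ (t.foldl PySem.Set.add s).length := by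
  induction t with
  | nil => intro s; simp
  | cons x r ih =>
    intro s
    refine le_trans ?_ (ih (PySem.Set.add s x))
    by_cases h : x ∈ s <;> simp [PySem.Set.add, h]

lemma pv_foldl_add_singleton (t : List Nat) : ∀ (c : Nat),
    ((t.foldl PySem.Set.add [c]).length = 1) ↔ t.all (fun x => x == c) = true := by
  induction t with
  | nil => intro c; simp
  | cons x r ih =>
    intro c
    by_cases hx : x = c
    · subst hx
      have : PySem.Set.add [x] x = [x] := by simp [PySem.Set.add, PySem.Set.contains]
      rw [List.foldl_cons, this, ih x]
      simp
    · have hadd : PySem.Set.add [c] x = [c, x] := by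
        simp [PySem.Set.add, hx]
      rw [List.foldl_cons, hadd]
      have h2 := pv_foldl_add_mono r [c, x]
      simp only [List.length_cons, List.length_nil] at h2
      constructor
      · intro h; exact absurd h (by omega)
      · intro h; simp at h; exact absurd h.1 hx

lemma pv_set_len_one (c : Nat) (t : List Nat) :
    ((PySem.Set.ofList (c :: t)).length = 1) ↔ t.all (fun x => x == c) = true := by
  rw [PySem.Set.ofList_eq_foldl]
  have : PySem.Set.add [] c = [c] := by simp [PySem.Set.add, PySem.Set.contains]
  rw [List.foldl_cons, this]
  exact pv_foldl_add_singleton t c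

lemma pv_isIn_nl (cs : List Char) : PySem.Chars.isIn ['\n'] cs = true ↔ '\n' ∈ cs := by
  rw [PySem.Chars.isIn_iff_infix]
  constructor
  · intro h
    exact h.mem (by simp)
  · intro h
    rcases List.append_of_mem h with ⟨s1, s2, rfl⟩
    exact ⟨s1, s2, by simp⟩

lemma pv_any_congr {α : Type} (l : List α) (p q : α → Bool) (h : ∀ a ∈ l, p a = q a) :
    l.any p = l.any q := by
  induction l with
  | nil => simp
  | cons a t ih =>
    simp only [List.any_cons]
    rw [h a (by simp), ih (fun a' ha' => h a' (by simp [ha']))]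

def pvCommon (cs : List Char) : Bool :=
  [',', '\t', ';', '|'].any (fun d =>
    match ((pvSplitRun [] cs).filter (fun l => !(l.all PySem.Chars.isspace))).map (fun l => l.count d) with
    | [] => false
    | c :: t => (t.all (fun x => x == c)) && decide (0 < c))

lemma pv_pred_eq (l : List Char) :
    (decide (PySem.Chars.strip l ≠ [])) = !(l.all PySem.Chars.isspace) := by
  by_cases h : PySem.Chars.strip l = []
  · simp [h, (pv_strip_nil_iff l).mp h]
  · have hna : l.all PySem.Chars.isspace ≠ true := fun hh => h ((pv_strip_nil_iff l).mpr hh)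
    simp [h, hna]

lemma pv_A_eq (content : String) (h : '\n' ∈ content.toList) :
    is_tabular_data_py content = pvCommon content.toList := by
  unfold is_tabular_data_py pvCommon
  simp only [pv_splitOn_eq, pv_splitRun_length]
  have hc : content.toList.count '\n' ≠ 0 := by
    simpa [List.count_eq_zero] using h
  rw [if_neg (by omega)]
  apply pv_any_congr
  intro d _
  rw [List.filter_congr (fun l _ => pv_pred_eq l)]
  rw [List.map_congr_left (fun l _ => pv_count_single d l)]
  cases hF : ((pvSplitRun [] content.toList).filter (fun l => !(l.all PySem.Chars.isspace))).map (fun l => l.count d) with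
  | nil => simp [PySem.Set.ofList]
  | cons c t =>
    have hs := pv_set_len_one c t
    by_cases hall : t.all (fun x => x == c) = true
    · simp [hs, hall]
    · simp [hs, hall]

lemma pv_B_eq (content : String) (h : '\n' ∈ content.toList) :
    is_tabular_data_py_alt content = pvCommon content.toList := by
  unfold is_tabular_data_py_alt
  rw [if_pos ((pv_isIn_nl content.toList).mpr h)]
  have hflat : content.toList ++ ['\n'] =
      ((pvSplitRun [] content.toList).map (fun p => p ++ ['\n'])).flatten := by
    rw [pv_splitRun_flatten content.toList []]; simp
  rw [hflat]
  have hinit : ([',', '\t', ';', '|'].map (fun d => (d, (-1 : Int), true, (0 : Int)))) =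
      ([',', '\t', ';', '|'].map (fun d => pvEnt d ((-1 : Int), true))) := rfl
  rw [hinit, pv_foldl_lines _ _ (pv_splitRun_no_nl content.toList [] (by simp)),
    pv_foldl_lineT]
  rw [List.any_map]
  unfold pvCommon
  apply pv_any_congr
  intro d _
  simp only [Function.comp_apply, pvEnt]
  rw [pv_fold_filter]
  cases hF : ((pvSplitRun [] content.toList).filter (fun l => !(l.all PySem.Chars.isspace))) with
  | nil => simp
  | cons l0 r =>
    simp only [List.map_cons, List.foldl_cons]
    have hq0 : pvQ ((-1 : Int), true) ((l0.count d : Int)) = ((l0.count d : Int), true) := by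
      simp [pvQ]
    simp only [hq0]
    rw [pv_qfold_known _ _ _ (by positivity)]
    dsimp only
    have hcast : ∀ (x : Nat), ((x : Int) == ((l0.count d : Nat) : Int)) = (x == l0.count d) := by
      intro x; by_cases hx : x = l0.count d <;> simp [hx]
    have e1 : decide ((0 : Int) < ((l0.count d : Nat) : Int)) = decide (0 < l0.count d) := by simp
    have e2 : (r.map (fun l => ((l.count d : Nat) : Int))).all (fun x => x == ((l0.count d : Nat) : Int))
        = (r.map (fun l => l.count d)).all (fun x => x == l0.count d) := by
      rw [List.all_map, List.all_map]
      congr 1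
      funext l
      simp only [Function.comp_apply]
      exact hcast _
    rw [e1, e2, Bool.true_and, Bool.and_comm]

theorem pv_main (content : String) :
    is_tabular_data_py content = is_tabular_data_py_alt content := by
  by_cases h : '\n' ∈ content.toList
  · rw [pv_A_eq content h, pv_B_eq content h]
  · have hA : is_tabular_data_py content = false := by
      unfold is_tabular_data_py
      have hc : content.toList.count '\n' = 0 := List.count_eq_zero.mpr h
      simp only [pv_splitOn_eq, pv_splitRun_length, hc]
      simp
    have hB : is_tabular_data_py_alt content = false := by
      unfold is_tabular_data_py_alt
      have : PySem.Chars.isIn ['\n'] content.toList ≠ true := fun hh => h ((pv_isIn_nl content.toList).mp hh)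
      simp [this]
    rw [hA, hB]

-- ===== VERDICT (by name: the statement is the Claim_ definition above) =====
theorem is_tabular_data_py_spec : Claim_equal_is_tabular_data_py := by
  intro content _
  exact pv_main content
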